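-- pv_equiv track=rewrite | github.com/Dan7C/card-listing-app-api | app/utils/fuzzy_match.py | _resolve_to_config_key
-- ===== SOURCE A (Python) =====
-- def _resolve_to_config_key(
--     matched_value: str,
--     config_section: dict | None
-- ) -> str:
--     """
--     Resolves a matched value (which may be an alias) back to its
--     parent config key.
--
--     If config_section is None, returns matched_value unchanged since
--     there is no section to search for aliases.
--
--     Args:
--         matched_value:  The string that was matched (key or alias)
--         config_section: The config dict section to search within,
--                         or None if alias resolution is not needed
--     """
--     if config_section is None:
--         return matched_value
--
--     matched_lower = matched_value.lower()
--
--     for key, data in config_section.items():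
--         if key.lower() == matched_lower:
--             return key
--         aliases = [a.lower() for a in data.get("aliases", [])]
--         if matched_lower in aliases:
--             return key
--
--     # fallback - return as-is if no parent found
--     return matched_value
-- ===== SOURCE B (Python) =====
-- def _resolve_to_config_key(
--     matched_value: str,
--     config_section: dict | None
-- ) -> str:
--     if config_section is None:
--         return matched_value
--     index = {}
--     for key, data in config_section.items():
--         index.setdefault(key.lower(), key)
--         for a in data.get("aliases", []):
--             index.setdefault(a.lower(), key)
--     return index.get(matched_value.lower(), matched_value)
-- ===== Notes on version B (the rewrite author's own statement) =====
-- stated objective: simpler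
-- what changed: Replaces the per-entry short-circuiting scan (key check, then build a lowered alias list and test membership) with a pre-pass that builds one first-wins lowercase->key index via dict.setdefault, followed by a single dict lookup with matched_value as fallback.
import Mathlib
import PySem

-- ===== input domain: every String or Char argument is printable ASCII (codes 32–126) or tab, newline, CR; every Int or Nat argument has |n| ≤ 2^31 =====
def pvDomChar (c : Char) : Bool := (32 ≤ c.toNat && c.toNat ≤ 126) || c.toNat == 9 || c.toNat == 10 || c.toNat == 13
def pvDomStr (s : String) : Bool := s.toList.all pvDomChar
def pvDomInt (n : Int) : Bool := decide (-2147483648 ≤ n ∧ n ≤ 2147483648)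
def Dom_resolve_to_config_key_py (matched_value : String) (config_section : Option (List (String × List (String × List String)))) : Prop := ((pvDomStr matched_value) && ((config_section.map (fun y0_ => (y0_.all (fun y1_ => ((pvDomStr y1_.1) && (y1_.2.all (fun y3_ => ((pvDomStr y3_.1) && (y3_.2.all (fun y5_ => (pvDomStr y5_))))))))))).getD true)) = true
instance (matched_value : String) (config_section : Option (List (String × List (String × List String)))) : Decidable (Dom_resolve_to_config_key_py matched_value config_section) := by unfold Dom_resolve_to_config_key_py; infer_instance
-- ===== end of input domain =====

-- B replaces A's short-circuiting per-entry scan by a first-wins lowercase->key index built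
-- with setdefault plus a single lookup (objective: simpler).


-- ===== PORT A =====
-- the 'for key, data in config_section.items():' loop with its early returns
def pvScanA (matched_lower matched_value : String) : List (String × List (String × List String)) → String
  | [] => matched_value
  | (key, data) :: rest =>
      if PySem.Str.lower key = matched_lower then key
      else
        let aliases := ((PySem.Dict.mk data).getD "aliases" []).map PySem.Str.lower
        if matched_lower ∈ aliases then key
        else pvScanA matched_lower matched_value rest

def resolve_to_config_key_py (matched_value : String) (config_section : Option (List (String × List (String × List String)))) : String :=
  match config_section with
  | none => matched_value
  | some items => pvScanA (PySem.Str.lower matched_value) matched_value items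

-- ===== PORT B =====
-- one loop iteration of the index-building pre-pass
def pvIndexStep (d : PySem.Dict String String) (entry : String × List (String × List String)) : PySem.Dict String String :=
  let d := d.setdefault (PySem.Str.lower entry.1) entry.1
  ((PySem.Dict.mk entry.2).getD "aliases" []).foldl (fun d a => d.setdefault (PySem.Str.lower a) entry.1) d

def resolve_to_config_key_py_alt (matched_value : String) (config_section : Option (List (String × List (String × List String)))) : String :=
  match config_section with
  | none => matched_value
  | some items =>
      let index := items.foldl pvIndexStep PySem.Dict.empty
      index.getD (PySem.Str.lower matched_value) matched_value

-- ===== PRECONDITION & SPEC =====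
def Spec_resolve_to_config_key_py (matched_value : String) (config_section : Option (List (String × List (String × List String)))) (out : String) : Prop := out = resolve_to_config_key_py_alt matched_value config_section
instance (matched_value : String) (config_section : Option (List (String × List (String × List String)))) (out : String) : Decidable (Spec_resolve_to_config_key_py matched_value config_section out) := by unfold Spec_resolve_to_config_key_py; infer_instance

-- ===== CLAIM (what is proved, stated in full; the proofs are below) =====
def Claim_equal_resolve_to_config_key_py : Prop := ∀ (matched_value : String) (config_section : Option (List (String × List (String × List String)))), Dom_resolve_to_config_key_py matched_value config_section → Spec_resolve_to_config_key_py matched_value config_section (resolve_to_config_key_py matched_value config_section)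

-- ===== LEMMAS AND PROOFS =====

-- A's scan, rephrased as an Option-valued first hit
def pvScanOpt (ml : String) : List (String × List (String × List String)) → Option String
  | [] => none
  | (key, data) :: rest =>
      if PySem.Str.lower key = ml then some key
      else if ml ∈ ((PySem.Dict.mk data).getD "aliases" []).map PySem.Str.lower then some key
      else pvScanOpt ml rest

theorem pvScanA_eq_opt (ml mv : String) (items : List (String × List (String × List String))) :
    pvScanA ml mv items = (pvScanOpt ml items).getD mv := by
  induction items with
  | nil => rfl
  | cons e rest ih =>
      obtain ⟨key, data⟩ := e
      simp only [pvScanA, pvScanOpt]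
      split_ifs <;> simp [ih]

theorem pvSetdefaultFold_get? (ml key : String) (as : List String) (d : PySem.Dict String String) :
    (as.foldl (fun d a => d.setdefault (PySem.Str.lower a) key) d).get? ml =
      ((d.get? ml).orElse (fun _ => if ml ∈ as.map PySem.Str.lower then some key else none)) := by
  induction as generalizing d with
  | nil => cases hd : d.get? ml <;> simp [Option.orElse, hd]
  | cons a rest ih =>
      simp only [List.foldl_cons, ih]
      by_cases h : ml = PySem.Str.lower a
      · subst h
        rw [PySem.Dict.get?_setdefault_self]
        cases hd : d.get? (PySem.Str.lower a) <;> simp [Option.orElse]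
      · rw [PySem.Dict.get?_setdefault_of_ne _ _ h]
        cases hd : d.get? ml <;> simp [Option.orElse, h]

theorem pvIndexFold_get? (ml : String) (items : List (String × List (String × List String)))
    (d : PySem.Dict String String) :
    (items.foldl pvIndexStep d).get? ml = ((d.get? ml).orElse (fun _ => pvScanOpt ml items)) := by
  induction items generalizing d with
  | nil => cases hd : d.get? ml <;> simp [Option.orElse, pvScanOpt, hd]
  | cons e rest ih =>
      obtain ⟨key, data⟩ := e
      simp only [List.foldl_cons, ih, pvIndexStep, pvScanOpt]
      rw [pvSetdefaultFold_get?]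
      by_cases hk : PySem.Str.lower key = ml
      · rw [show ml = PySem.Str.lower key from hk.symm, PySem.Dict.get?_setdefault_self]
        cases hd : d.get? (PySem.Str.lower key) <;> simp [Option.orElse, hk]
      · rw [PySem.Dict.get?_setdefault_of_ne _ _ (fun h => hk h.symm)]
        cases hd : d.get? ml
        · by_cases hm : ml ∈ ((PySem.Dict.mk data).getD "aliases" []).map PySem.Str.lower
          · simp [Option.orElse, hk, hm]
          · simp [Option.orElse, hk, hm]
        · simp [Option.orElse]

-- ===== VERDICT (by name: the statement is the Claim_ definition above) =====
theorem resolve_to_config_key_py_spec : Claim_equal_resolve_to_config_key_py := by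
  intro matched_value config_section _
  unfold Spec_resolve_to_config_key_py resolve_to_config_key_py resolve_to_config_key_py_alt
  cases config_section with
  | none => rfl
  | some items =>
      simp only [pvScanA_eq_opt, PySem.Dict.getD_eq_get?_getD, pvIndexFold_get?,
        PySem.Dict.get?_empty]
      cases pvScanOpt (PySem.Str.lower matched_value) items <;> simp [Option.orElse]
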